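-- pv_equiv track=rewrite | github.com/1Kanishq/python | Recursion/3.py | fuct1
-- ===== SOURCE A (Python) =====
-- def fuct1(a,b,i=0,c=0,c1=0):
--     if i>=len(a) and i>=len(b):
--         return abs(c-c1)
--     if a[i]=='1':
--         c+=1
--     if b[i]=='1':
--         c1+=1
--     return fuct1(a,b,i+1,c,c1)
-- ===== SOURCE B (Python) =====
-- def fuct1(a, b, i=0, c=0, c1=0):
--     for j in range(i, max(len(a), len(b))):
--         if a[j] == '1':
--             c += 1
--         if b[j] == '1':
--             c1 += 1
--     return abs(c - c1)
-- ===== Notes on version B (the rewrite author's own statement) =====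
-- stated objective: simpler
-- what changed: Replaces the self-recursion carrying accumulators with a single bounded for-loop over range(i, max(len(a), len(b))) and a final abs; same accesses in the same order, no recursion depth limit.
import Mathlib
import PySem

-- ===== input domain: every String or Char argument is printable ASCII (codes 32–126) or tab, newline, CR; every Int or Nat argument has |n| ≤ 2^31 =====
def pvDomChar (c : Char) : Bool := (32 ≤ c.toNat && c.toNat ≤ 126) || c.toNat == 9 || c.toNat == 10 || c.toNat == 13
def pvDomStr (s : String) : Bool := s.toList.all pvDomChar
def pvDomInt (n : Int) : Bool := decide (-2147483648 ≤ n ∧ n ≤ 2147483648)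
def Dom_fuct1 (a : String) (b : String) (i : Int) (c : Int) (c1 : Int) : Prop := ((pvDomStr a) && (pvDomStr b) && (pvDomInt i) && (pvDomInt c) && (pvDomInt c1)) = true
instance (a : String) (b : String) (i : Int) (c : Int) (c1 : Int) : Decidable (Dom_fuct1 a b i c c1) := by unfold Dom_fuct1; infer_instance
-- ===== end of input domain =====

-- B replaces A's self-recursion with a single bounded for-loop over range(i, max(len a, len b)) plus a final abs (simpler; no recursion depth).

-- ===== PORT A =====
def fuct1 (a : String) (b : String) (i : Int) (c : Int) (c1 : Int) : Int :=
  if (a.toList.length : Int) ≤ i ∧ (b.toList.length : Int) ≤ i then |c - c1|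
  else
    match PySem.List.pyGet? a.toList i, PySem.List.pyGet? b.toList i with
    | some ca, some cb =>
        fuct1 a b (i + 1) (if ca = '1' then c + 1 else c) (if cb = '1' then c1 + 1 else c1)
    | _, _ => 0   -- IndexError in Python; excluded by Pre_
termination_by (max (a.toList.length : Int) (b.toList.length : Int) - i).toNat
decreasing_by omega

-- ===== PORT B =====
def fuct1_alt (a : String) (b : String) (i : Int) (c : Int) (c1 : Int) : Int :=
  let p := (PySem.List.pyRange i (max (a.toList.length : Int) (b.toList.length : Int)) 1).foldl
    (fun (s : Int × Int) j =>
      (if PySem.List.pyGet? a.toList j = some '1' then s.1 + 1 else s.1,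
       if PySem.List.pyGet? b.toList j = some '1' then s.2 + 1 else s.2))
    (c, c1)
  |p.1 - p.2|

-- ===== PRECONDITION & SPEC =====
-- A raises IndexError unless either the start index is already past both strings, or
-- the strings have equal length and i is a valid (possibly negative) index start; Pre_ is exactly where A returns.
def Pre_fuct1 (a : String) (b : String) (i : Int) (c : Int) (c1 : Int) : Prop :=
  ((a.toList.length : Int) ≤ i ∧ (b.toList.length : Int) ≤ i) ∨
  (a.toList.length = b.toList.length ∧ -(a.toList.length : Int) ≤ i)
instance (a : String) (b : String) (i : Int) (c : Int) (c1 : Int) : Decidable (Pre_fuct1 a b i c c1) := by unfold Pre_fuct1; infer_instance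
def pvWitness_fuct1 : String × String × Int × Int × Int := ("1011", "0110", 0, 0, 0)

def Spec_fuct1 (a : String) (b : String) (i : Int) (c : Int) (c1 : Int) (out : Int) : Prop := out = fuct1_alt a b i c c1
instance (a : String) (b : String) (i : Int) (c : Int) (c1 : Int) (out : Int) : Decidable (Spec_fuct1 a b i c c1 out) := by unfold Spec_fuct1; infer_instance

-- ===== CLAIM (what is proved, stated in full; the proofs are below) =====
def Claim_equal_fuct1 : Prop := ∀ (a : String) (b : String) (i : Int) (c : Int) (c1 : Int), Dom_fuct1 a b i c c1 → Pre_fuct1 a b i c c1 → Spec_fuct1 a b i c c1 (fuct1 a b i c c1)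

-- ===== LEMMAS AND PROOFS =====

lemma fuct1_key (a b : String) : ∀ (n : Nat) (i c c1 : Int), Pre_fuct1 a b i c c1 →
    (max (a.toList.length : Int) (b.toList.length : Int) - i).toNat = n →
    fuct1 a b i c c1 = fuct1_alt a b i c c1 := by
  intro n
  induction n with
  | zero =>
      intro i c c1 _ hn
      have hge : max (a.toList.length : Int) (b.toList.length : Int) ≤ i := by omega
      rw [fuct1, fuct1_alt]
      simp only [PySem.List.pyRange_one_eq_nil hge, List.foldl_nil]
      rw [if_pos (by constructor <;> omega)]
  | succ n ih =>
      intro i c c1 hpre hn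
      by_cases hge : max (a.toList.length : Int) (b.toList.length : Int) ≤ i
      · rw [fuct1, fuct1_alt]
        simp only [PySem.List.pyRange_one_eq_nil hge, List.foldl_nil]
        rw [if_pos (by constructor <;> omega)]
      · have hlt : i < max (a.toList.length : Int) (b.toList.length : Int) := by omega
        have heq : a.toList.length = b.toList.length := by
          rcases hpre with ⟨h1, h2⟩ | ⟨h, _⟩
          · omega
          · exact h
        have hil : i < (a.toList.length : Int) := by omega
        have hneg : -(a.toList.length : Int) ≤ i := by
          rcases hpre with ⟨h1, h2⟩ | ⟨_, h⟩
          · omega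
          · exact h
        obtain ⟨ca, hca⟩ : ∃ x, PySem.List.pyGet? a.toList i = some x := by
          cases h : PySem.List.pyGet? a.toList i with
          | none =>
              rw [PySem.List.pyGet?_eq_none_iff] at h
              exact absurd ⟨hneg, hil⟩ h
          | some x => exact ⟨x, rfl⟩
        obtain ⟨cb, hcb⟩ : ∃ x, PySem.List.pyGet? b.toList i = some x := by
          cases h : PySem.List.pyGet? b.toList i with
          | none =>
              rw [PySem.List.pyGet?_eq_none_iff] at h
              exact absurd ⟨by omega, by omega⟩ h
          | some x => exact ⟨x, rfl⟩
        rw [fuct1]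
        rw [if_neg (by omega), hca, hcb]
        dsimp only
        have hpre' : Pre_fuct1 a b (i + 1) (if ca = '1' then c + 1 else c) (if cb = '1' then c1 + 1 else c1) :=
          Or.inr ⟨heq, by omega⟩
        rw [ih (i + 1) _ _ hpre' (by omega)]
        rw [fuct1_alt, fuct1_alt]
        rw [PySem.List.pyRange_one_cons hlt, List.foldl_cons]
        simp only [hca, hcb, Option.some.injEq]

-- ===== VERDICT (by name: the statement is the Claim_ definition above) =====
theorem fuct1_spec : Claim_equal_fuct1 := by
  intro a b i c c1 _ hpre
  exact (fuct1_key a b _ i c c1 hpre rfl).symm ▸ rfl
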